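-- pv_equiv track=rewrite | github.com/AP-MI-2021/lab-2-irinaranga | main.py | get_age_in_days
-- ===== SOURCE A (Python) =====
-- def get_age_in_days(birthday):
--     '''
--     Determina varsta persoanei in zile
--     :param birthday: lista ce contine data nasterii, de forma DD/MM/YYYY
--     :return: varsta in zile a unei persoane (aid)
--     '''
--     # ziua, luna si anul nasterii
--     bd = int(birthday[0:2])
--     bm = int(birthday[3:5]) - 1
--     by = int(birthday[6:10])
--     today = "03/11/2021"
--
--     # ziua, luna si anul din prezent
--     td = int(today[0:2])
--     tm = int(today[3:5])
--     ty = int(today[6:10])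
--     aid = 0
--     month = [31, 29, 30, 31, 30, 31, 30, 31, 30, 31, 30, 31]
--
--     # adaugam zilele trecute din anul curent
--     aid = aid + td
--     for i in range(0, tm):
--         aid = aid + month[i]
--
--     # adaugam zilele trecute din anii trecuti
--     aid = aid + (month[bm] - bd)
--     for i in range(bm+1, 12):
--         aid = aid + month[i]
--
--     # adaugam zilele din anii ramasi
--     for i in range(by+1, ty):
--         if i % 4 == 0:
--             aid = aid + 366
--         else:
--             aid = aid + 365
--     return aid
-- ===== SOURCE B (Python) =====
-- MONTH = [31, 29, 30, 31, 30, 31, 30, 31, 30, 31, 30, 31]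
--
--
-- def get_age_in_days(birthday):
--     bd = int(birthday[0:2])
--     bm = int(birthday[3:5]) - 1
--     by = int(birthday[6:10])
--     # today is fixed at 03/11/2021: 3 days plus the first 11 months
--     days_this_year = 3 + sum(MONTH[:11])
--     # remaining days of the birth year
--     days_birth_year = sum(MONTH[bm:]) - bd
--     # whole years strictly between by and 2021, with the leap loop replaced
--     # by a closed-form count of multiples of 4 in [by+1, 2020]
--     n = 2021 - by - 1
--     years = 365 * n + (2020 // 4 - by // 4) if n > 0 else 0
--     return days_this_year + days_birth_year + years
-- ===== Notes on version B (the rewrite author's own statement) =====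
-- stated objective: faster
-- what changed: Replaced the per-year leap loop over range(by+1, 2021) with a closed-form multiples-of-4 count (2020//4 - by//4) and the two month loops with slice sums over the month table.
-- outside the precondition, e.g. on get_age_in_days('03/00/2020'): A returns 730, B returns 365
import Mathlib
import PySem

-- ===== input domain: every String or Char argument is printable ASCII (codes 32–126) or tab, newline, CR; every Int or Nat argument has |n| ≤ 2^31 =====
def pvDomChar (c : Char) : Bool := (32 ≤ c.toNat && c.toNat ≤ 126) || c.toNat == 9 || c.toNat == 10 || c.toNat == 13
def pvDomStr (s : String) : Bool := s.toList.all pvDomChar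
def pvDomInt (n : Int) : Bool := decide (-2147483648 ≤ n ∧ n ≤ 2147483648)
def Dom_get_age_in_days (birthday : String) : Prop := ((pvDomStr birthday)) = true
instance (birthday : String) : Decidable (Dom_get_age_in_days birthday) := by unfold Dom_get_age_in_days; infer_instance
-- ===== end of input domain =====

-- B replaces A's per-year leap loop by a closed-form multiples-of-4 count and the month loops by slice sums.


-- ===== PORT A =====
def get_age_in_days (birthday : String) : Int :=
  let bd := (PySem.Int.ofStr? (PySem.Str.slice birthday (some 0) (some 2))).getD 0
  let bm := (PySem.Int.ofStr? (PySem.Str.slice birthday (some 3) (some 5))).getD 0 - 1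
  let by_ := (PySem.Int.ofStr? (PySem.Str.slice birthday (some 6) (some 10))).getD 0
  let today := "03/11/2021"
  let td := (PySem.Int.ofStr? (PySem.Str.slice today (some 0) (some 2))).getD 0
  let tm := (PySem.Int.ofStr? (PySem.Str.slice today (some 3) (some 5))).getD 0
  let ty := (PySem.Int.ofStr? (PySem.Str.slice today (some 6) (some 10))).getD 0
  let aid : Int := 0
  let month : List Int := [31, 29, 30, 31, 30, 31, 30, 31, 30, 31, 30, 31]
  let aid := aid + td
  let aid := (PySem.List.pyRange 0 tm 1).foldl (fun a i => a + PySem.List.pyGetD month i 0) aid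
  let aid := aid + (PySem.List.pyGetD month bm 0 - bd)
  let aid := (PySem.List.pyRange (bm + 1) 12 1).foldl (fun a i => a + PySem.List.pyGetD month i 0) aid
  let aid := (PySem.List.pyRange (by_ + 1) ty 1).foldl
      (fun a i => if PySem.Int.mod i 4 = 0 then a + 366 else a + 365) aid
  aid

-- ===== PORT B =====
def pvMONTH : List Int := [31, 29, 30, 31, 30, 31, 30, 31, 30, 31, 30, 31]

def get_age_in_days_alt (birthday : String) : Int :=
  let bd := (PySem.Int.ofStr? (PySem.Str.slice birthday (some 0) (some 2))).getD 0
  let bm := (PySem.Int.ofStr? (PySem.Str.slice birthday (some 3) (some 5))).getD 0 - 1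
  let by_ := (PySem.Int.ofStr? (PySem.Str.slice birthday (some 6) (some 10))).getD 0
  let daysThisYear : Int := 3 + (PySem.List.slice pvMONTH none (some 11)).sum
  let daysBirthYear := (PySem.List.slice pvMONTH (some bm) none).sum - bd
  let n := 2021 - by_ - 1
  let years := if n > 0 then 365 * n + (PySem.Int.floordiv 2020 4 - PySem.Int.floordiv by_ 4) else 0
  daysThisYear + daysBirthYear + years

-- ===== PRECONDITION & SPEC =====
-- Pre_ restricts to the natural DD/MM/YYYY domain: the three fields parse as ints and the month
-- field is 1..12.  Outside it A raises (ValueError on a non-int field, IndexError for month ≥ 13)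
-- or, for month ≤ 0, returns a negative-index-wraparound artefact that is not a meaningful age.
def Pre_get_age_in_days (birthday : String) : Prop :=
  (PySem.Int.ofStr? (PySem.Str.slice birthday (some 0) (some 2))).isSome = true ∧
  (PySem.Int.ofStr? (PySem.Str.slice birthday (some 6) (some 10))).isSome = true ∧
  1 ≤ (PySem.Int.ofStr? (PySem.Str.slice birthday (some 3) (some 5))).getD 0 ∧
  (PySem.Int.ofStr? (PySem.Str.slice birthday (some 3) (some 5))).getD 0 ≤ 12 ∧
  (PySem.Int.ofStr? (PySem.Str.slice birthday (some 3) (some 5))).isSome = true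
instance (birthday : String) : Decidable (Pre_get_age_in_days birthday) := by
  unfold Pre_get_age_in_days; infer_instance

def pvWitness_get_age_in_days : String := "14/07/1995"

def Spec_get_age_in_days (birthday : String) (out : Int) : Prop := out = get_age_in_days_alt birthday
instance (birthday : String) (out : Int) : Decidable (Spec_get_age_in_days birthday out) := by
  unfold Spec_get_age_in_days; infer_instance

-- ===== CLAIM (what is proved, stated in full; the proofs are below) =====
def Claim_equal_get_age_in_days : Prop := ∀ (birthday : String), Dom_get_age_in_days birthday → Pre_get_age_in_days birthday → Spec_get_age_in_days birthday (get_age_in_days birthday)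

-- ===== LEMMAS AND PROOFS =====

-- one leap-loop step as a difference of floor divisions
lemma pv_leap_step (a : Int) :
    (if PySem.Int.mod a 4 = 0 then (366 : Int) else 365)
      = 365 + (PySem.Int.floordiv a 4 - PySem.Int.floordiv (a - 1) 4) := by
  rw [PySem.Int.mod_eq_emod_of_pos (by norm_num), PySem.Int.floordiv_eq_ediv_of_pos (by norm_num),
    PySem.Int.floordiv_eq_ediv_of_pos (by norm_num)]
  split_ifs with h <;> omega

-- A's year loop in closed form
lemma pv_leap_fold (b : Int) : ∀ (k : Nat) (a acc : Int), (b - a).toNat = k →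
    (PySem.List.pyRange a b 1).foldl
        (fun s i => if PySem.Int.mod i 4 = 0 then s + 366 else s + 365) acc
      = acc + (if a < b then 365 * (b - a) + (PySem.Int.floordiv (b - 1) 4 - PySem.Int.floordiv (a - 1) 4) else 0) := by
  intro k
  induction k with
  | zero =>
    intro a acc hk
    have hab : ¬ a < b := by omega
    have : PySem.List.pyRange a b 1 = [] := by
      cases h : PySem.List.pyRange a b 1 with
      | nil => rfl
      | cons x xs =>
        exfalso
        have hx : x ∈ PySem.List.pyRange a b 1 := by rw [h]; exact List.mem_cons_self
        have := (PySem.List.mem_pyRange_one).mp hx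
        omega
    simp [this, hab]
  | succ k ih =>
    intro a acc hk
    have hab : a < b := by omega
    rw [PySem.List.pyRange_one_cons hab, List.foldl_cons, ih (a + 1) _ (by omega)]
    have hi : (if PySem.Int.mod a 4 = 0 then acc + 366 else acc + 365)
        = acc + 365 + (PySem.Int.floordiv a 4 - PySem.Int.floordiv (a - 1) 4) := by
      have hstep := pv_leap_step a
      split_ifs at * <;> omega
    rw [hi, show a + 1 - 1 = a from by ring]
    by_cases h1 : a + 1 < b
    · rw [if_pos h1, if_pos hab]
      ring
    · have hb : b = a + 1 := by omega
      subst hb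
      rw [if_neg h1, if_pos hab, show a + 1 - 1 = a from by ring]
      ring

-- the two month loops of A as slice sums of B (concrete 12-case facts)
lemma pv_month_head :
    (List.map (fun i => PySem.List.pyGetD ([31, 29, 30, 31, 30, 31, 30, 31, 30, 31, 30, 31] : List Int) i 0) (PySem.List.pyRange 0 11 1)).sum
      = (PySem.List.slice pvMONTH none (some 11)).sum := by decide

lemma pv_month_tail (m : Int) (h1 : 1 ≤ m) (h2 : m ≤ 12) :
    (List.map (fun i => PySem.List.pyGetD ([31, 29, 30, 31, 30, 31, 30, 31, 30, 31, 30, 31] : List Int) i 0) (PySem.List.pyRange m 12 1)).sum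
      = (PySem.List.slice pvMONTH (some (m - 1)) none).sum - PySem.List.pyGetD ([31, 29, 30, 31, 30, 31, 30, 31, 30, 31, 30, 31] : List Int) (m - 1) 0 := by
  interval_cases m <;> decide

theorem get_age_in_days_spec : Claim_equal_get_age_in_days := by
  intro birthday _ hpre
  obtain ⟨h1, h2, hm1, hm2, h3⟩ := hpre
  obtain ⟨d, hd⟩ := Option.isSome_iff_exists.mp h1
  obtain ⟨y, hy⟩ := Option.isSome_iff_exists.mp h2
  obtain ⟨m, hm⟩ := Option.isSome_iff_exists.mp h3
  rw [hm] at hm1 hm2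
  simp only [Option.getD_some] at hm1 hm2
  unfold Spec_get_age_in_days get_age_in_days get_age_in_days_alt
  simp only [hd, hy, hm, Option.getD_some,
    show PySem.Int.ofStr? (PySem.Str.slice "03/11/2021" (some 0) (some 2)) = some 3 from by decide,
    show PySem.Int.ofStr? (PySem.Str.slice "03/11/2021" (some 3) (some 5)) = some 11 from by decide,
    show PySem.Int.ofStr? (PySem.Str.slice "03/11/2021" (some 6) (some 10)) = some 2021 from by decide]
  rw [PySem.List.foldl_add, PySem.List.foldl_add,
    pv_leap_fold _ (2021 - (y + 1)).toNat (y + 1) _ rfl]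
  have hm' : m - 1 + 1 = m := by ring
  rw [hm', pv_month_head, pv_month_tail m hm1 hm2,
    show y + 1 - 1 = y from by ring]
  split_ifs with h h'
  · ring
  · exfalso; omega
  · exfalso; omega
  · ring
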